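-- pv_equiv track=rewrite | github.com/JoyceXu02/annotation_gui | GUI.py | highlight_tags
-- ===== SOURCE A (Python) =====
-- def highlight_tags(text):
--     tag_styles = {
--         "Issue": "background-color: #ffcccc; font-weight: bold;",
--         "Reason": "background-color: #ccffcc; font-weight: bold;",
--         "Conclusion": "background-color: #ccccff; font-weight: bold;"
--     }
--     for tag, style in tag_styles.items():
--         text = text.replace(f"<{tag}>", f'<span style="{style}">')
--         text = text.replace(f"</{tag}>", "</span>")
--     return text
-- ===== SOURCE B (Python) =====
-- def highlight_tags(text):
--     reps = {
--         "<Issue>": '<span style="background-color: #ffcccc; font-weight: bold;">',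
--         "</Issue>": "</span>",
--         "<Reason>": '<span style="background-color: #ccffcc; font-weight: bold;">',
--         "</Reason>": "</span>",
--         "<Conclusion>": '<span style="background-color: #ccccff; font-weight: bold;">',
--         "</Conclusion>": "</span>",
--     }
--     out = []
--     i = 0
--     n = len(text)
--     while i < n:
--         for pat, rep in reps.items():
--             if text.startswith(pat, i):
--                 out.append(rep)
--                 i += len(pat)
--                 break
--         else:
--             out.append(text[i])
--             i += 1
--     return "".join(out)
-- ===== Notes on version B (the rewrite author's own statement) =====
-- stated objective: alternative
-- what changed: B replaces A's six sequential whole-string str.replace passes by a single left-to-right scan that at each position tries the six literal tags and emits either the styled replacement or the current character.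
import Mathlib
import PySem

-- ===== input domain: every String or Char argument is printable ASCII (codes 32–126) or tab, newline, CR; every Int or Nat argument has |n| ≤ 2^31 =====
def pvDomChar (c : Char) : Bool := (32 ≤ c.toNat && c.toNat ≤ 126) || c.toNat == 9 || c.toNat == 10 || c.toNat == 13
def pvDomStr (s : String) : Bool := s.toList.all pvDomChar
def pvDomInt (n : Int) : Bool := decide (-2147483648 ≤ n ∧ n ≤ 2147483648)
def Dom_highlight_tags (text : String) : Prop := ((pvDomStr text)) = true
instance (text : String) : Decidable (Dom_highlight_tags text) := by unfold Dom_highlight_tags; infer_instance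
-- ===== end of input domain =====

-- B does one left-to-right pass trying the six literal tags at each position instead of A's
-- six whole-string str.replace passes; equal return value is proved for every string.

-- ===== PORT A =====
-- A loops over a 3-entry literal dict doing two str.replace calls per tag; the loop is
-- unrolled here into the six replace calls it performs, in the same order.
def highlight_tags (text : String) : String :=
  PySem.Str.replace
    (PySem.Str.replace
      (PySem.Str.replace
        (PySem.Str.replace
          (PySem.Str.replace
            (PySem.Str.replace text
              "<Issue>" "<span style=\"background-color: #ffcccc; font-weight: bold;\">")
            "</Issue>" "</span>")
          "<Reason>" "<span style=\"background-color: #ccffcc; font-weight: bold;\">")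
        "</Reason>" "</span>")
      "<Conclusion>" "<span style=\"background-color: #ccccff; font-weight: bold;\">")
    "</Conclusion>" "</span>"

-- ===== PORT B =====
-- the (pattern, replacement) pairs of Source B's `reps` dict, in insertion order
def pvPats : List (List Char × List Char) :=
  [ ("<Issue>".toList, "<span style=\"background-color: #ffcccc; font-weight: bold;\">".toList),
    ("</Issue>".toList, "</span>".toList),
    ("<Reason>".toList, "<span style=\"background-color: #ccffcc; font-weight: bold;\">".toList),
    ("</Reason>".toList, "</span>".toList),
    ("<Conclusion>".toList, "<span style=\"background-color: #ccccff; font-weight: bold;\">".toList),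
    ("</Conclusion>".toList, "</span>".toList) ]

-- Source B's inner `for pat, rep in reps.items(): if text.startswith(pat, i)` loop
def pvFirstMatch (l : List Char) : Option (List Char × List Char) :=
  pvPats.find? (fun pr => pr.1.isPrefixOf l)

-- used by pvScan's termination proof
theorem pvFirstMatch_pos {l : List Char} {pr : List Char × List Char}
    (h : pvFirstMatch l = some pr) : 0 < pr.1.length := by
  have hmem := List.mem_of_find?_eq_some h
  fin_cases hmem <;> decide

-- Source B's outer while-loop: one pass, at each position emit a replacement or the character
def pvScan : List Char → List Char
  | [] => []
  | c :: t =>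
    match h : pvFirstMatch (c :: t) with
    | some pr => pr.2 ++ pvScan ((c :: t).drop pr.1.length)
    | none => c :: pvScan t
  termination_by s => s.length
  decreasing_by
  · have := pvFirstMatch_pos h
    simp
    omega
  · simp

def highlight_tags_alt (text : String) : String :=
  String.ofList (pvScan text.toList)

-- ===== PRECONDITION & SPEC =====
def Spec_highlight_tags (text : String) (out : String) : Prop := out = highlight_tags_alt text
instance (text : String) (out : String) : Decidable (Spec_highlight_tags text out) := by unfold Spec_highlight_tags; infer_instance

-- ===== CLAIM (what is proved, stated in full; the proofs are below) =====
def Claim_equal_highlight_tags : Prop := ∀ (text : String), Dom_highlight_tags text → Spec_highlight_tags text (highlight_tags text)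

-- ===== LEMMAS AND PROOFS =====

theorem pvScan_nil : pvScan [] = [] := by rw [pvScan]

theorem pvScan_cons_some {c : Char} {t : List Char} {pr : List Char × List Char}
    (h : pvFirstMatch (c :: t) = some pr) :
    pvScan (c :: t) = pr.2 ++ pvScan ((c :: t).drop pr.1.length) := by
  rw [pvScan]
  split
  · rename_i pr' h'
    rw [h'] at h
    cases h
    rfl
  · rename_i h'
    rw [h'] at h
    cases h

theorem pvScan_cons_none {c : Char} {t : List Char}
    (h : pvFirstMatch (c :: t) = none) :
    pvScan (c :: t) = c :: pvScan t := by
  rw [pvScan]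
  split
  · rename_i pr' h'
    rw [h'] at h
    cases h
  · rfl

-- leftmost non-overlapping replacement, recursively (= Python str.replace for a nonempty pattern)
def pvRepl (old new : List Char) : List Char → List Char
  | [] => []
  | c :: t =>
    if old.isPrefixOf (c :: t) then new ++ pvRepl old new (t.drop (old.length - 1))
    else c :: pvRepl old new t
  termination_by s => s.length
  decreasing_by
  · simp
  · simp

theorem pvGo_eq (old new : List Char) (hold : old ≠ []) :
    ∀ fuel (s acc : List Char), s.length ≤ fuel →
      PySem.Chars.replace.go old new fuel s acc = acc.reverse ++ pvRepl old new s := by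
  intro fuel
  induction fuel with
  | zero =>
    intro s acc hs
    have : s = [] := by
      cases s with
      | nil => rfl
      | cons c t => simp at hs
    subst this
    simp [PySem.Chars.replace.go, pvRepl]
  | succ n ih =>
    intro s acc hs
    cases s with
    | nil => simp [PySem.Chars.replace.go, pvRepl]
    | cons c t =>
      rw [PySem.Chars.replace.go]
      split
      · -- old matches at head
        rename_i hpre
        obtain ⟨m, hm⟩ : ∃ m, old.length = m + 1 := by
          cases old with
          | nil => exact absurd rfl hold
          | cons a b => exact ⟨b.length, rfl⟩
        have hdrop : (c :: t).drop old.length = t.drop (old.length - 1) := by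
          rw [hm]; simp
        rw [hdrop]
        rw [ih _ _ (by simp at hs ⊢; omega)]
        rw [pvRepl]
        rw [if_pos hpre]
        simp
      · rename_i hpre
        rw [ih _ _ (by simp at hs ⊢; omega)]
        rw [pvRepl, if_neg hpre]
        simp

theorem pvReplace_eq (old new s : List Char) (hold : old ≠ []) :
    PySem.Chars.replace s old new = pvRepl old new s := by
  rw [PySem.Chars.replace]
  rw [if_neg (by simpa using hold)]
  simpa using pvGo_eq old new hold s.length s [] le_rfl

-- A's loop as a fold over the pattern list
def pvFoldRepl (pats : List (List Char × List Char)) (s : List Char) : List Char :=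
  pats.foldl (fun acc pr => pvRepl pr.1 pr.2 acc) s

theorem pvFoldRepl_nil (pats : List (List Char × List Char)) : pvFoldRepl pats [] = [] := by
  induction pats with
  | nil => rfl
  | cons pr rest ih =>
    have h0 : pvRepl pr.1 pr.2 [] = [] := by rw [pvRepl]
    simp [pvFoldRepl, List.foldl, h0] at ih ⊢
    exact ih

-- neither a prefix of the other ⇒ not a prefix even with more appended
theorem pvNotPrefixAppend {a b X : List Char} (h1 : ¬ a <+: b) (h2 : ¬ b <+: a) :
    ¬ a <+: b ++ X := by
  intro h
  by_cases hle : a.length ≤ b.length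
  · exact h1 (List.prefix_of_prefix_length_le h (List.prefix_append b X) hle)
  · exact h2 (List.prefix_of_prefix_length_le (List.prefix_append b X) h (by omega))

-- decided facts about the six concrete (pattern, replacement) pairs
theorem pvShape : ∀ pr ∈ pvPats,
    pr.1.head? = some '<' ∧ pr.1.tail ≠ [] ∧ '<' ∉ pr.1.tail ∧ pr.2.head? = some '<' := by
  decide

theorem pvPatRep : ∀ pr ∈ pvPats, ∀ qr ∈ pvPats, ∀ j < qr.2.length,
    ¬ pr.1 <+: qr.2.drop j ∧ ¬ qr.2.drop j <+: pr.1 := by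
  decide

theorem pvPatPat : ∀ pr ∈ pvPats, ∀ qr ∈ pvPats, pr ≠ qr → ∀ j < qr.1.length,
    ¬ pr.1 <+: qr.1.drop j ∧ ¬ qr.1.drop j <+: pr.1 := by
  decide

theorem pvPats_nodup : pvPats.Nodup := by decide

-- pvRepl passes over a block r no pattern occurrence can touch
theorem pvReplPassthrough (p rep : List Char) :
    ∀ (r X : List Char),
      (∀ j < r.length, ¬ p <+: r.drop j ∧ ¬ r.drop j <+: p) →
      pvRepl p rep (r ++ X) = r ++ pvRepl p rep X := by
  intro r
  induction r with
  | nil => intro X _; simp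
  | cons c r' ih =>
    intro X h
    have h0 := h 0 (by simp)
    simp only [List.drop_zero] at h0
    have hnp : ¬ p <+: (c :: r') ++ X := pvNotPrefixAppend h0.1 h0.2
    have : (c :: r') ++ X = c :: (r' ++ X) := by simp
    rw [this]
    rw [pvRepl, if_neg (by rw [List.isPrefixOf_iff_prefix]; simpa using hnp)]
    rw [ih X (fun j hj => by simpa using h (j + 1) (by simp; omega))]
    simp

-- a pattern with no '<' after position 0 never newly matches inside pvRepl's output:
-- helper for tails (w nonempty, no '<' at all)
theorem pvNoLT (q rep : List Char) (hrep : rep.head? = some '<') :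
    ∀ (s w : List Char), w ≠ [] → '<' ∉ w → ¬ w <+: s → ¬ w <+: pvRepl q rep s := by
  intro s
  induction s with
  | nil =>
    intro w hw _ _
    rw [pvRepl]
    simpa using hw
  | cons c t ih =>
    intro w hw hlt hws
    rw [pvRepl]
    split
    · -- replacement emitted: starts with '<', w has no '<'
      obtain ⟨rep', hrep'⟩ : ∃ rep', rep = '<' :: rep' := by
        cases rep with
        | nil => simp at hrep
        | cons a b => simp at hrep; exact ⟨b, by rw [hrep]⟩
      subst hrep'
      cases w with
      | nil => exact absurd rfl hw
      | cons w0 w1 =>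
        intro hpre
        have : w0 :: w1 <+: '<' :: (rep' ++ pvRepl q ('<' :: rep') (t.drop (q.length - 1))) := by
          simpa using hpre
        rw [List.cons_prefix_cons] at this
        exact hlt (by simp [this.1])
    · cases w with
      | nil => exact absurd rfl hw
      | cons w0 w1 =>
        intro hpre
        rw [List.cons_prefix_cons] at hpre
        obtain ⟨hw0, hw1⟩ := hpre
        subst hw0
        have hnt : ¬ w1 <+: t := by
          intro hh
          exact hws (by rw [List.cons_prefix_cons]; exact ⟨rfl, hh⟩)
        have hw1ne : w1 ≠ [] := by
          intro hnil
          exact hnt (by simp [hnil])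
        exact ih w1 hw1ne (fun hm => hlt (by simp [hm])) hnt hw1

-- no new match of pattern p is created by replacing q with rep
theorem pvNP (q rep p : List Char)
    (hrep : rep.head? = some '<')
    (hp : p.head? = some '<') (hpt : p.tail ≠ []) (hplt : '<' ∉ p.tail)
    (h1 : ¬ p <+: rep) (h2 : ¬ rep <+: p) :
    ∀ s, ¬ p <+: s → ¬ p <+: pvRepl q rep s := by
  intro s hs
  obtain ⟨p', hp'⟩ : ∃ p', p = '<' :: p' := by
    cases p with
    | nil => simp at hp
    | cons a b => simp at hp; exact ⟨b, by rw [hp]⟩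
  cases s with
  | nil =>
    rw [pvRepl]
    simp [hp']
  | cons c t =>
    rw [pvRepl]
    split
    · exact pvNotPrefixAppend h1 h2
    · intro hpre
      rw [hp', List.cons_prefix_cons] at hpre
      obtain ⟨hc, hrest⟩ := hpre
      subst hc
      have hnt : ¬ p' <+: t := by
        intro hh
        exact hs (by rw [hp', List.cons_prefix_cons]; exact ⟨rfl, hh⟩)
      have hne : p' ≠ [] := by simpa [hp'] using hpt
      have hnlt : '<' ∉ p' := by simpa [hp'] using hplt
      exact pvNoLT q rep hrep t p' hne hnlt hnt hrest

-- fold version over a sublist of pvPats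
theorem pvFoldCons (pats : List (List Char × List Char))
    (hsub : ∀ pr ∈ pats, pr ∈ pvPats) :
    ∀ (c : Char) (t : List Char), (∀ pr ∈ pats, ¬ pr.1 <+: c :: t) →
      pvFoldRepl pats (c :: t) = c :: pvFoldRepl pats t := by
  induction pats with
  | nil => intro c t _; rfl
  | cons qr rest ih =>
    intro c t h
    have hq : qr ∈ pvPats := hsub qr (by simp)
    have hstep : pvRepl qr.1 qr.2 (c :: t) = c :: pvRepl qr.1 qr.2 t := by
      rw [pvRepl, if_neg (by rw [List.isPrefixOf_iff_prefix]; exact h qr (by simp))]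
    have hrest : ∀ pr ∈ rest, ¬ pr.1 <+: c :: pvRepl qr.1 qr.2 t := by
      intro pr hmem
      have hprv : pr ∈ pvPats := hsub pr (by simp [hmem])
      have hshape := pvShape pr hprv
      have hqshape := pvShape qr hq
      have hpr := pvPatRep pr hprv qr hq 0 (by
        cases hq2 : qr.2 with
        | nil => rw [hq2] at hqshape; simp at hqshape
        | cons a b => simp)
      simp only [List.drop_zero] at hpr
      have := pvNP qr.1 qr.2 pr.1 hqshape.2.2.2 hshape.1 hshape.2.1 hshape.2.2.1
        hpr.1 hpr.2 (c :: t) (h pr (by simp [hmem]))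
      rwa [hstep] at this
    calc pvFoldRepl (qr :: rest) (c :: t)
        = pvFoldRepl rest (pvRepl qr.1 qr.2 (c :: t)) := rfl
      _ = pvFoldRepl rest (c :: pvRepl qr.1 qr.2 t) := by rw [hstep]
      _ = c :: pvFoldRepl rest (pvRepl qr.1 qr.2 t) :=
          ih (fun pr hpr => hsub pr (by simp [hpr])) c _ hrest
      _ = c :: pvFoldRepl (qr :: rest) t := rfl

theorem pvFoldPassthrough (pats : List (List Char × List Char)) :
    ∀ (r X : List Char),
      (∀ pr ∈ pats, ∀ j < r.length, ¬ pr.1 <+: r.drop j ∧ ¬ r.drop j <+: pr.1) →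
      pvFoldRepl pats (r ++ X) = r ++ pvFoldRepl pats X := by
  induction pats with
  | nil => intro r X _; rfl
  | cons qr rest ih =>
    intro r X h
    have hstep : pvRepl qr.1 qr.2 (r ++ X) = r ++ pvRepl qr.1 qr.2 X :=
      pvReplPassthrough qr.1 qr.2 r X (h qr (by simp))
    calc pvFoldRepl (qr :: rest) (r ++ X)
        = pvFoldRepl rest (pvRepl qr.1 qr.2 (r ++ X)) := rfl
      _ = pvFoldRepl rest (r ++ pvRepl qr.1 qr.2 X) := by rw [hstep]
      _ = r ++ pvFoldRepl rest (pvRepl qr.1 qr.2 X) :=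
          ih r _ (fun pr hpr => h pr (by simp [hpr]))
      _ = r ++ pvFoldRepl (qr :: rest) X := rfl

theorem pvReplHeadMatch (p rep Y : List Char) (hp : p ≠ []) :
    pvRepl p rep (p ++ Y) = rep ++ pvRepl p rep Y := by
  cases p with
  | nil => exact absurd rfl hp
  | cons a p' =>
    have : (a :: p') ++ Y = a :: (p' ++ Y) := by simp
    rw [this, pvRepl,
      if_pos (by rw [List.isPrefixOf_iff_prefix]; exact List.prefix_append (a :: p') Y)]
    congr 1
    congr 1
    simp

-- MAIN: the six sequential replaces equal the single scan
theorem pvMain : ∀ (n : Nat) (s : List Char), s.length ≤ n →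
    pvFoldRepl pvPats s = pvScan s := by
  intro n
  induction n with
  | zero =>
    intro s hs
    have : s = [] := by cases s with
      | nil => rfl
      | cons c t => simp at hs
    subst this
    rw [pvFoldRepl_nil, pvScan_nil]
  | succ n ih =>
    intro s hs
    cases s with
    | nil => rw [pvFoldRepl_nil, pvScan_nil]
    | cons c t =>
      rcases hfm : pvFirstMatch (c :: t) with _ | ⟨p, r⟩
      · -- no tag matches at this position
        have hnone := List.find?_eq_none.mp hfm
        have h : ∀ pr ∈ pvPats, ¬ pr.1 <+: c :: t := by
          intro pr hpr hh
          exact hnone pr hpr (by rw [List.isPrefixOf_iff_prefix]; exact hh)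
        rw [pvFoldCons pvPats (fun pr h => h) c t h]
        rw [ih t (by simp at hs; omega)]
        rw [pvScan_cons_none hfm]
      · have hmem : (p, r) ∈ pvPats := List.mem_of_find?_eq_some hfm
        have hpre : p <+: c :: t := by
          have := List.find?_some hfm
          rwa [List.isPrefixOf_iff_prefix] at this
        obtain ⟨rest, hrest⟩ := hpre
        have hshape := pvShape (p, r) hmem
        have hpne : p ≠ [] := by
          intro hnil; rw [hnil] at hshape; simp at hshape
        -- split pvPats around (p, r)
        obtain ⟨l1, l2, hsplit⟩ := List.append_of_mem hmem
        have hnodup := pvPats_nodup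
        rw [hsplit] at hnodup
        have hnotl1 : (p, r) ∉ l1 := by
          intro hh
          rcases List.nodup_append.mp hnodup with ⟨_, _, hdisj⟩
          exact hdisj (p, r) hh (p, r) (by simp) rfl
        have hnotl2 : (p, r) ∉ l2 := by
          rcases List.nodup_append.mp hnodup with ⟨_, h2, _⟩
          exact (List.nodup_cons.mp h2).1
        have hsubl1 : ∀ pr ∈ l1, pr ∈ pvPats := by
          intro pr h; rw [hsplit]; simp [h]
        have hsubl2 : ∀ pr ∈ l2, pr ∈ pvPats := by
          intro pr h; rw [hsplit]; simp [h]
        -- the fold splits into: passthrough p, replace, passthrough r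
        have step1 : pvFoldRepl l1 (p ++ rest) = p ++ pvFoldRepl l1 rest := by
          apply pvFoldPassthrough
          intro pr hpr j hj
          exact pvPatPat pr (hsubl1 pr hpr) (p, r) hmem
            (fun hh => hnotl1 (hh ▸ hpr)) j hj
        have step2 : pvRepl p r (p ++ pvFoldRepl l1 rest) = r ++ pvRepl p r (pvFoldRepl l1 rest) :=
          pvReplHeadMatch p r _ hpne
        have step3 : pvFoldRepl l2 (r ++ pvRepl p r (pvFoldRepl l1 rest))
            = r ++ pvFoldRepl l2 (pvRepl p r (pvFoldRepl l1 rest)) := by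
          apply pvFoldPassthrough
          intro pr hpr j hj
          exact pvPatRep pr (hsubl2 pr hpr) (p, r) hmem j hj
        have hfold : pvFoldRepl pvPats (c :: t) = r ++ pvFoldRepl pvPats rest := by
          rw [← hrest, hsplit]
          show pvFoldRepl (l1 ++ (p, r) :: l2) (p ++ rest) = _
          rw [show pvFoldRepl (l1 ++ (p, r) :: l2) (p ++ rest)
              = pvFoldRepl l2 (pvRepl p r (pvFoldRepl l1 (p ++ rest))) by
            simp [pvFoldRepl, List.foldl_append]]
          rw [step1, step2, step3]
          rw [show pvFoldRepl (l1 ++ (p, r) :: l2) rest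
              = pvFoldRepl l2 (pvRepl p r (pvFoldRepl l1 rest)) by
            simp [pvFoldRepl, List.foldl_append]]
        rw [hfold]
        have hlen : rest.length ≤ n := by
          have : p.length + rest.length = t.length + 1 := by
            rw [← List.length_append, hrest]; simp
          have hp1 : 0 < p.length := by
            cases p with
            | nil => exact absurd rfl hpne
            | cons a b => simp
          simp at hs
          omega
        rw [ih rest hlen]
        have hdrop : (c :: t).drop p.length = rest := by
          rw [← hrest]; exact List.drop_left
        rw [pvScan_cons_some hfm]
        rw [hdrop]

-- ===== VERDICT (by name: the statement is the Claim_ definition above) =====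
theorem highlight_tags_spec : Claim_equal_highlight_tags := by
  intro text _
  unfold Spec_highlight_tags
  have hA : (highlight_tags text).toList = pvFoldRepl pvPats text.toList := by
    simp only [highlight_tags, PySem.Str.toList_replace]
    rw [pvReplace_eq _ _ _ (by decide), pvReplace_eq _ _ _ (by decide),
        pvReplace_eq _ _ _ (by decide), pvReplace_eq _ _ _ (by decide),
        pvReplace_eq _ _ _ (by decide), pvReplace_eq _ _ _ (by decide)]
    simp [pvFoldRepl, pvPats, List.foldl]
  have hB : (highlight_tags_alt text).toList = pvScan text.toList := by
    simp [highlight_tags_alt]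
  have h := pvMain text.toList.length text.toList le_rfl
  have heq : (highlight_tags text).toList = (highlight_tags_alt text).toList := by
    rw [hA, hB, h]
  have h2 := congrArg String.ofList heq
  rwa [String.ofList_toList, String.ofList_toList] at h2
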